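-- pv_equiv track=rewrite | github.com/ktubhyam/tubhyam.dev | apps/vibescope/scripts/preprocess_qm9s.py | smiles_to_formula
-- ===== SOURCE A (Python) =====
-- ELEMENT_SYMBOLS: dict[int, str] = {
--     1: "H", 6: "C", 7: "N", 8: "O", 9: "F", 16: "S", 17: "Cl",
-- }
--
-- def smiles_to_formula(smiles: str, atomic_numbers: list[int]) -> str:
--     """Generate molecular formula from atomic numbers."""
--     from collections import Counter
--     counts = Counter(ELEMENT_SYMBOLS.get(z, "?") for z in atomic_numbers)
--     # Standard order: C, H, then alphabetical
--     formula = ""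
--     for elem in ["C", "H"]:
--         if elem in counts:
--             formula += elem
--             if counts[elem] > 1:
--                 formula += str(counts[elem])
--             del counts[elem]
--     for elem in sorted(counts):
--         formula += elem
--         if counts[elem] > 1:
--             formula += str(counts[elem])
--     return formula
-- ===== SOURCE B (Python) =====
-- def smiles_to_formula(smiles: str, atomic_numbers: list[int]) -> str:
--     """Generate molecular formula from atomic numbers."""
--     # The symbol alphabet is closed (7 elements + '?'), so the Hill output order
--     # (C, H, then alphabetical) is known statically; count each slot directly,
--     # no Counter, no deletion, no sorting.
--     known = (1, 6, 7, 8, 9, 16, 17)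
--     slots = [("C", 6), ("H", 1), ("?", None), ("Cl", 17), ("F", 9), ("N", 7), ("O", 8), ("S", 16)]
--     parts = []
--     for sym, z in slots:
--         n = atomic_numbers.count(z) if z is not None else sum(1 for a in atomic_numbers if a not in known)
--         if n:
--             parts.append(sym if n == 1 else sym + str(n))
--     return "".join(parts)
-- ===== Notes on version B (the rewrite author's own statement) =====
-- stated objective: alternative
-- what changed: B drops the Counter/del/sort machinery entirely: since the symbol alphabet is closed (7 elements plus '?'), the Hill output order is known statically, so B walks a fixed 8-slot table in output order, counting each atomic number directly in the input list and appending symbol(+count) when present.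
import Mathlib
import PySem

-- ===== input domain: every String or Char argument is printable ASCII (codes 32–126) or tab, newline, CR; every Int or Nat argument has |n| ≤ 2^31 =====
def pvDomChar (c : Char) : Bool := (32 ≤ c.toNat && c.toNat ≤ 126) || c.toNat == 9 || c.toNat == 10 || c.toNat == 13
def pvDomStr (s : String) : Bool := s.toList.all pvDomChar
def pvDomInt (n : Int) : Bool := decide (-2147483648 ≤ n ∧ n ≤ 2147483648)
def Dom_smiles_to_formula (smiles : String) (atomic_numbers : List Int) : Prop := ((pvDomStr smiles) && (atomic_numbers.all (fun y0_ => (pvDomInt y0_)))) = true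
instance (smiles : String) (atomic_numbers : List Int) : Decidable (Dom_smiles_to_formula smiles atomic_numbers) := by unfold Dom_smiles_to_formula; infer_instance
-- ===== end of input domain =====

-- B drops A's Counter/del/sort machinery: the symbol alphabet is closed, so B walks a fixed
-- 8-slot table in the known Hill output order and counts each slot directly (objective: alternative).

-- ===== PORT A =====
-- the module constant ELEMENT_SYMBOLS; strings are carried as List Char
def pvELEMENT_SYMBOLS : PySem.Dict Int (List Char) :=
  PySem.Dict.ofList [((1 : Int), ['H']), (6, ['C']), (7, ['N']), (8, ['O']), (9, ['F']), (16, ['S']), (17, ['C','l'])]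

def smiles_to_formula (smiles : String) (atomic_numbers : List Int) : String :=
  let counts := PySem.Dict.counter (atomic_numbers.map (fun z => pvELEMENT_SYMBOLS.getD z ['?']))
  let st := [['C'], ['H']].foldl
    (fun (st : List Char × PySem.Dict (List Char) Int) elem =>
      if st.2.contains elem then
        let f := st.1 ++ elem
        let f := if st.2.getD elem 0 > 1 then f ++ (PySem.Int.toStr (st.2.getD elem 0)).toList else f
        (f, st.2.erase elem)
      else st)
    (([] : List Char), counts)
  String.mk ((PySem.List.sorted st.2.keys (fun s => s) false).foldl
    (fun f elem =>
      let f := f ++ elem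
      if st.2.getD elem 0 > 1 then f ++ (PySem.Int.toStr (st.2.getD elem 0)).toList else f)
    st.1)

-- ===== PORT B =====
-- the fixed slot table of Source B: symbols in Hill output order, each with its atomic number
-- (none = the unknown bucket '?')
def pvSlots : List (List Char × Option Int) :=
  [(['C'], some 6), (['H'], some 1), (['?'], none), (['C','l'], some 17),
   (['F'], some 9), (['N'], some 7), (['O'], some 8), (['S'], some 16)]

def smiles_to_formula_alt (smiles : String) (atomic_numbers : List Int) : String :=
  let known : List Int := [1, 6, 7, 8, 9, 16, 17]
  let parts : List (List Char) := pvSlots.foldl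
    (fun parts slot =>
      let n : Int := match slot.2 with
        | some z => (PySem.List.count atomic_numbers z : Int)
        | none => atomic_numbers.foldl (fun acc a => if known.contains a then acc else acc + 1) 0
      if n ≠ 0 then
        parts ++ [if n == 1 then slot.1 else slot.1 ++ (PySem.Int.toStr n).toList]
      else parts)
    []
  String.mk parts.flatten

-- ===== PRECONDITION & SPEC =====
def Spec_smiles_to_formula (smiles : String) (atomic_numbers : List Int) (out : String) : Prop := out = smiles_to_formula_alt smiles atomic_numbers
instance (smiles : String) (atomic_numbers : List Int) (out : String) : Decidable (Spec_smiles_to_formula smiles atomic_numbers out) := by unfold Spec_smiles_to_formula; infer_instance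

-- ===== CLAIM (what is proved, stated in full; the proofs are below) =====
def Claim_equal_smiles_to_formula : Prop := ∀ (smiles : String) (atomic_numbers : List Int), Dom_smiles_to_formula smiles atomic_numbers → Spec_smiles_to_formula smiles atomic_numbers (smiles_to_formula smiles atomic_numbers)

-- ===== LEMMAS AND PROOFS =====

-- all symbols the element map can produce, in B's (Hill) output order; its tail after C, H
def pvSymAll : List (List Char) := [['C'], ['H'], ['?'], ['C','l'], ['F'], ['N'], ['O'], ['S']]
def pvRest6 : List (List Char) := [['?'], ['C','l'], ['F'], ['N'], ['O'], ['S']]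

-- the piece of formula contributed by one symbol s, under count dictionary d
def pvEntry (d : PySem.Dict (List Char) Int) (s : List Char) : List Char :=
  if d.getD s 0 > 1 then s ++ (PySem.Int.toStr (d.getD s 0)).toList else s

lemma pvStepA_eq (d : PySem.Dict (List Char) Int) (f s : List Char) :
    (if d.getD s 0 > 1 then (f ++ s) ++ (PySem.Int.toStr (d.getD s 0)).toList else f ++ s)
      = f ++ pvEntry d s := by
  unfold pvEntry; split <;> simp

-- closed form of the element-symbol lookup
lemma pv_f_eq (a : Int) : pvELEMENT_SYMBOLS.getD a ['?'] =
    if a = 1 then ['H'] else if a = 6 then ['C'] else if a = 7 then ['N'] else if a = 8 then ['O']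
    else if a = 9 then ['F'] else if a = 16 then ['S'] else if a = 17 then ['C','l'] else ['?'] := by
  have h : pvELEMENT_SYMBOLS = PySem.Dict.mk [((1 : Int), ['H']), (6, ['C']), (7, ['N']),
      (8, ['O']), (9, ['F']), (16, ['S']), (17, ['C','l'])] := by decide
  rw [h]
  by_cases h1 : a = 1
  · subst h1; decide
  by_cases h2 : a = 6
  · subst h2; decide
  by_cases h3 : a = 7
  · subst h3; decide
  by_cases h4 : a = 8
  · subst h4; decide
  by_cases h5 : a = 9
  · subst h5; decide
  by_cases h6 : a = 16
  · subst h6; decide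
  by_cases h7 : a = 17
  · subst h7; decide
  simp [PySem.Dict.getD, Ne.symm h1, Ne.symm h2, Ne.symm h3,
    Ne.symm h4, Ne.symm h5, Ne.symm h6, Ne.symm h7, h1, h2, h3, h4, h5, h6, h7, PySem.Dict.get?]

lemma pv_f_mem (a : Int) : pvELEMENT_SYMBOLS.getD a ['?'] ∈ pvSymAll := by
  rw [pv_f_eq]; split_ifs <;> decide

lemma pv_find?_filter_ne {ν : Type} (l : List (List Char × ν)) (k k' : List Char)
    (h : k' ≠ k) :
    (l.filter (fun p => !(p.1 == k))).find? (fun p => p.1 == k')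
      = l.find? (fun p => p.1 == k') := by
  induction l with
  | nil => rfl
  | cons p l ih =>
    by_cases hpk : p.1 = k
    · have hpk' : ¬ p.1 = k' := fun e => h (by rw [← e, hpk])
      have hkk' : ¬ k = k' := fun e => h e.symm
      simp [List.filter_cons, List.find?_cons, hpk, hpk', hkk', ih]
    · by_cases hpk' : p.1 = k'
      · simp [List.filter_cons, List.find?_cons, hpk, hpk', h]
      · simp [List.filter_cons, List.find?_cons, hpk, hpk', ih]

lemma pv_get?_erase_of_ne {ν : Type} (d : PySem.Dict (List Char) ν) (k k' : List Char)
    (h : k' ≠ k) : (d.erase k).get? k' = d.get? k' := by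
  obtain ⟨items⟩ := d
  simp only [PySem.Dict.erase, PySem.Dict.get?]
  rw [pv_find?_filter_ne items k k' h]

lemma pv_getD_erase_of_ne {ν : Type} (d : PySem.Dict (List Char) ν) (k k' : List Char)
    (dflt : ν) (h : k' ≠ k) : (d.erase k).getD k' dflt = d.getD k' dflt := by
  unfold PySem.Dict.getD; rw [pv_get?_erase_of_ne d k k' h]

lemma pv_contains_erase_of_ne {ν : Type} (d : PySem.Dict (List Char) ν) (k k' : List Char)
    (h : k' ≠ k) : (d.erase k).contains k' = d.contains k' := by
  obtain ⟨items⟩ := d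
  simp only [PySem.Dict.erase, PySem.Dict.contains]
  induction items with
  | nil => rfl
  | cons p l ih =>
    by_cases hpk : p.1 = k
    · have hpk' : ¬ p.1 = k' := fun e => h (by rw [← e, hpk])
      have hkk' : ¬ k = k' := fun e => h e.symm
      simp [hpk, hpk', hkk', ih]
    · simp [List.filter_cons, hpk, ih]

lemma pv_keys_erase {ν : Type} (d : PySem.Dict (List Char) ν) (k : List Char) :
    (d.erase k).keys = d.keys.filter (fun s => !(s == k)) := by
  obtain ⟨items⟩ := d
  induction items with
  | nil => rfl
  | cons p l ih =>
    by_cases hpk : p.1 = k <;>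
      simp [PySem.Dict.erase, PySem.Dict.keys, hpk] at * <;> exact ih

-- the default LT/DecidableLT instances on List Char are defeq to the LinearOrder ones;
-- this lemma moves PySem.List.sorted from one pair to the other
lemma pv_insertBy_congr {α : Type} (b1 b2 : α → α → Bool)
    (h : ∀ a b, b1 a b = b2 a b) (x : α) (l : List α) :
    PySem.List.insertBy b1 x l = PySem.List.insertBy b2 x l := by
  induction l with
  | nil => rfl
  | cons y ys ih => simp only [PySem.List.insertBy, h, ih]

lemma pv_foldl_insertBy_congr {α : Type} (b1 b2 : α → α → Bool)
    (h : ∀ a b, b1 a b = b2 a b) (xs : List α) (init : List α) :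
    xs.foldl (fun acc x => PySem.List.insertBy b1 x acc) init
      = xs.foldl (fun acc x => PySem.List.insertBy b2 x acc) init := by
  induction xs generalizing init with
  | nil => rfl
  | cons y ys ih => simp only [List.foldl_cons, pv_insertBy_congr b1 b2 h]

lemma pv_sorted_inst {α : Type} (xs : List α) (key : α → List Char) :
    PySem.List.sorted xs key false
      = @PySem.List.sorted α (List Char) List.instLinearOrder.toLT
          LinearOrder.toDecidableLT xs key false := by
  show xs.foldl (fun acc x => PySem.List.insertBy
      (fun a b : α => @decide (key a < key b) ((key a).decidableLT (key b))) x acc) []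
    = xs.foldl (fun acc x => PySem.List.insertBy
      (fun a b : α => @decide (key a < key b)
        (@LinearOrder.toDecidableLT _ List.instLinearOrder (key a) (key b))) x acc) []
  exact pv_foldl_insertBy_congr _ _ (fun a b => decide_eq_decide.mpr Iff.rfl) xs []

lemma pv_rest6_pairwise : List.Pairwise (fun a b : List Char => a < b) pvRest6 := by decide

-- A's sort of the leftover keys produces exactly the static tail order, filtered to present keys
lemma pv_sorted_rest (ks : List (List Char)) (hnd : ks.Nodup)
    (hsub : ∀ s ∈ ks, s ∈ pvSymAll) (hC : (['C'] : List Char) ∉ ks) (hH : (['H'] : List Char) ∉ ks) :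
    PySem.List.sorted ks (fun s => s) false = pvRest6.filter (fun s => decide (s ∈ ks)) := by
  rw [pv_sorted_inst]
  apply PySem.List.sorted_eq_of_perm_of_pairwise_lt
  · rw [List.perm_ext_iff_of_nodup (List.Nodup.filter _ (by decide)) hnd]
    intro s
    simp only [List.mem_filter, decide_eq_true_eq]
    constructor
    · exact fun h => h.2
    · intro hs
      refine ⟨?_, hs⟩
      have h8 := hsub s hs
      have hsC : s ≠ ['C'] := fun e => hC (e ▸ hs)
      have hsH : s ≠ ['H'] := fun e => hH (e ▸ hs)
      simp only [pvSymAll, List.mem_cons, List.not_mem_nil, or_false] at h8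
      rcases h8 with rfl|rfl|rfl|rfl|rfl|rfl|rfl|rfl <;>
        first | exact absurd rfl hsC | exact absurd rfl hsH | decide
  · exact List.Pairwise.filter _ pv_rest6_pairwise

-- A's whole post-counter construction, normalised: static order filtered to the present keys
lemma pv_rest6_ne (s : List Char) (hs : s ∈ pvRest6) : s ≠ ['C'] ∧ s ≠ ['H'] := by
  fin_cases hs <;> exact ⟨by decide, by decide⟩

lemma pv_coreA (d : PySem.Dict (List Char) Int) (hnd : d.keys.Nodup)
    (hsub : ∀ s ∈ d.keys, s ∈ pvSymAll) :
    (let st := [['C'], ['H']].foldl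
      (fun (st : List Char × PySem.Dict (List Char) Int) elem =>
        if st.2.contains elem then
          let f := st.1 ++ elem
          let f := if st.2.getD elem 0 > 1 then f ++ (PySem.Int.toStr (st.2.getD elem 0)).toList else f
          (f, st.2.erase elem)
        else st)
      (([] : List Char), d)
    (PySem.List.sorted st.2.keys (fun s => s) false).foldl
      (fun f elem =>
        let f := f ++ elem
        if st.2.getD elem 0 > 1 then f ++ (PySem.Int.toStr (st.2.getD elem 0)).toList else f)
      st.1)
    = (pvSymAll.filter (fun s => decide (s ∈ d.keys))).foldl
        (fun f s => f ++ pvEntry d s) [] := by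
  have hHC : (['H'] : List Char) ≠ ['C'] := by decide
  have hsplit : pvSymAll.filter (fun s => decide (s ∈ d.keys))
      = (if (['C'] : List Char) ∈ d.keys then [['C']] else [])
        ++ ((if (['H'] : List Char) ∈ d.keys then [['H']] else [])
          ++ pvRest6.filter (fun s => decide (s ∈ d.keys))) := by
    show (['C'] :: ['H'] :: pvRest6).filter _ = _
    simp only [List.filter_cons]
    by_cases hc : (['C'] : List Char) ∈ d.keys <;>
      by_cases hh : (['H'] : List Char) ∈ d.keys <;> simp [hc, hh]
  rw [hsplit, List.foldl_append, List.foldl_append]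
  have htail : ∀ (d' : PySem.Dict (List Char) Int) (init : List Char),
      (∀ x ∈ pvRest6, d'.getD x 0 = d.getD x 0) →
      (∀ x, x ∈ d'.keys ↔ (x ∈ d.keys ∧ x ≠ ['C'] ∧ x ≠ ['H'])) →
      d'.keys.Nodup →
      (PySem.List.sorted d'.keys (fun s => s) false).foldl
        (fun f elem =>
          let f := f ++ elem
          if d'.getD elem 0 > 1 then f ++ (PySem.Int.toStr (d'.getD elem 0)).toList else f)
        init
      = (pvRest6.filter (fun s => decide (s ∈ d.keys))).foldl (fun f s => f ++ pvEntry d s) init := by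
    intro d' init hgd hmem hnd'
    rw [pv_sorted_rest d'.keys hnd'
      (fun s hs => hsub s ((hmem s).mp hs).1)
      (fun hc => (((hmem _).mp hc).2.1) rfl)
      (fun hh => (((hmem _).mp hh).2.2) rfl)]
    have hfc : pvRest6.filter (fun s => decide (s ∈ d'.keys))
        = pvRest6.filter (fun s => decide (s ∈ d.keys)) := by
      apply List.filter_congr
      intro x hx
      have hne := pv_rest6_ne x hx
      simp only [decide_eq_decide, hmem x]
      constructor
      · exact fun h => h.1
      · exact fun h => ⟨h, hne.1, hne.2⟩
    rw [hfc]
    apply PySem.List.foldl_congr_mem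
    intro acc x hx
    have hx6 := List.mem_filter.mp hx
    rw [pvStepA_eq d' acc x]
    unfold pvEntry
    rw [hgd x hx6.1]
  simp only [List.foldl_cons, List.foldl_nil]
  by_cases hC : d.contains ['C'] = true
  · have hCk : (['C'] : List Char) ∈ d.keys := (PySem.Dict.contains_iff_mem_keys d _).mp hC
    by_cases hH : d.contains ['H'] = true
    · have hHk : (['H'] : List Char) ∈ d.keys := (PySem.Dict.contains_iff_mem_keys d _).mp hH
      have h1 : (d.erase ['C']).contains ['H'] = true := by
        rw [pv_contains_erase_of_ne d _ _ hHC]; exact hH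
      simp only [hC, h1, if_true]
      rw [if_pos hCk, if_pos hHk]
      simp only [List.foldl_cons, List.foldl_nil]
      rw [pv_getD_erase_of_ne d _ _ _ hHC]
      rw [htail ((d.erase ['C']).erase ['H']) _ ?g1 ?m1 ?n1]
      case g1 =>
        intro x hx
        have hne := pv_rest6_ne x hx
        rw [pv_getD_erase_of_ne _ _ _ _ hne.2, pv_getD_erase_of_ne _ _ _ _ hne.1]
      case m1 =>
        intro x
        rw [pv_keys_erase, pv_keys_erase]
        simp only [List.mem_filter, List.mem_filter, Bool.not_eq_eq_eq_not, Bool.not_true,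
          beq_eq_false_iff_ne, ne_eq]
        constructor
        · rintro ⟨⟨hk, hc⟩, hh⟩; exact ⟨hk, hc, hh⟩
        · rintro ⟨hk, hc, hh⟩; exact ⟨⟨hk, hc⟩, hh⟩
      case n1 =>
        rw [pv_keys_erase, pv_keys_erase]
        exact (hnd.filter _).filter _
      simp only [pvStepA_eq]
    · have hH' : d.contains ['H'] = false := by
        cases h2 : d.contains ['H'] with
        | false => rfl
        | true => exact absurd h2 hH
      have hHk : (['H'] : List Char) ∉ d.keys := by
        intro hmem
        rw [(PySem.Dict.contains_iff_mem_keys d ['H']).mpr hmem] at hH'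
        cases hH'
      have h1 : (d.erase ['C']).contains ['H'] = false := by
        rw [pv_contains_erase_of_ne d _ _ hHC]; exact hH'
      simp only [hC, if_true, h1, Bool.false_eq_true, if_false]
      rw [if_pos hCk, if_neg hHk]
      simp only [List.foldl_cons, List.foldl_nil]
      rw [htail (d.erase ['C']) _ ?g2 ?m2 ?n2]
      case g2 =>
        intro x hx
        exact pv_getD_erase_of_ne _ _ _ _ (pv_rest6_ne x hx).1
      case m2 =>
        intro x
        rw [pv_keys_erase]
        simp only [List.mem_filter, Bool.not_eq_eq_eq_not, Bool.not_true, beq_eq_false_iff_ne, ne_eq]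
        constructor
        · rintro ⟨hk, hc⟩
          exact ⟨hk, hc, fun e => hHk (e ▸ hk)⟩
        · rintro ⟨hk, hc, _⟩; exact ⟨hk, hc⟩
      case n2 =>
        rw [pv_keys_erase]; exact hnd.filter _
      simp only [pvStepA_eq]
  · have hC' : d.contains ['C'] = false := by
      cases h2 : d.contains ['C'] with
      | false => rfl
      | true => exact absurd h2 hC
    have hCk : (['C'] : List Char) ∉ d.keys := by
      intro hmem
      rw [(PySem.Dict.contains_iff_mem_keys d ['C']).mpr hmem] at hC'
      cases hC'
    by_cases hH : d.contains ['H'] = true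
    · have hHk : (['H'] : List Char) ∈ d.keys := (PySem.Dict.contains_iff_mem_keys d _).mp hH
      simp only [hC', Bool.false_eq_true, if_false, hH, if_true]
      rw [if_neg hCk, if_pos hHk]
      simp only [List.foldl_cons, List.foldl_nil]
      rw [htail (d.erase ['H']) _ ?g3 ?m3 ?n3]
      case g3 =>
        intro x hx
        exact pv_getD_erase_of_ne _ _ _ _ (pv_rest6_ne x hx).2
      case m3 =>
        intro x
        rw [pv_keys_erase]
        simp only [List.mem_filter, Bool.not_eq_eq_eq_not, Bool.not_true, beq_eq_false_iff_ne, ne_eq]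
        constructor
        · rintro ⟨hk, hh⟩
          exact ⟨hk, fun e => hCk (e ▸ hk), hh⟩
        · rintro ⟨hk, _, hh⟩; exact ⟨hk, hh⟩
      case n3 =>
        rw [pv_keys_erase]; exact hnd.filter _
      simp only [pvStepA_eq]
    · have hH' : d.contains ['H'] = false := by
        cases h2 : d.contains ['H'] with
        | false => rfl
        | true => exact absurd h2 hH
      have hHk : (['H'] : List Char) ∉ d.keys := by
        intro hmem
        rw [(PySem.Dict.contains_iff_mem_keys d ['H']).mpr hmem] at hH'
        cases hH'
      simp only [hC', hH', Bool.false_eq_true, if_false]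
      rw [if_neg hCk, if_neg hHk]
      simp only [List.foldl_nil]
      rw [htail d _ (fun x _ => rfl) ?m4 hnd]
      case m4 =>
        intro x
        constructor
        · intro hk
          exact ⟨hk, fun e => hCk (e ▸ hk), fun e => hHk (e ▸ hk)⟩
        · exact fun h => h.1

-- B's per-slot count and formatting, named for the proof
def pvN (ans : List Int) (slot : List Char × Option Int) : Int :=
  match slot.2 with
  | some z => (PySem.List.count ans z : Int)
  | none => ans.foldl (fun acc a => if ([1, 6, 7, 8, 9, 16, 17] : List Int).contains a then acc else acc + 1) 0

def pvG (ans : List Int) (slot : List Char × Option Int) : List Char :=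
  if pvN ans slot == 1 then slot.1 else slot.1 ++ (PySem.Int.toStr (pvN ans slot)).toList

lemma pv_count_slot (ans : List Int) (sym : List Char) (z : Int)
    (h : ∀ a : Int, (pvELEMENT_SYMBOLS.getD a ['?'] == sym) = (a == z)) :
    List.count sym (ans.map (fun x => pvELEMENT_SYMBOLS.getD x ['?'])) = List.count z ans := by
  rw [List.count_eq_countP, List.count_eq_countP, List.countP_map]
  have he : ((fun x => x == sym) ∘ (fun x : Int => pvELEMENT_SYMBOLS.getD x ['?']))
      = (fun a : Int => a == z) := funext h
  rw [he]

lemma pv_beq_of_ne (a : Int) (sym : List Char) (z : Int)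
    (hz : (pvELEMENT_SYMBOLS.getD z ['?']) = sym)
    (hinj : ∀ b : Int, pvELEMENT_SYMBOLS.getD b ['?'] = sym → b = z) :
    (pvELEMENT_SYMBOLS.getD a ['?'] == sym) = (a == z) := by
  by_cases hb : a = z
  · subst hb; simp [hz]
  · have : pvELEMENT_SYMBOLS.getD a ['?'] ≠ sym := fun e => hb (hinj a e)
    simp [this, hb]

lemma pv_n_eq (ans : List Int) : ∀ slot ∈ pvSlots,
    pvN ans slot = (List.count slot.1 (ans.map (fun x => pvELEMENT_SYMBOLS.getD x ['?'])) : Int) := by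
  intro slot hslot
  have hq : ∀ a : Int, (pvELEMENT_SYMBOLS.getD a ['?'] == (['?'] : List Char))
      = !(([1, 6, 7, 8, 9, 16, 17] : List Int).contains a) := by
    intro a
    rw [pv_f_eq]
    split_ifs <;> simp_all
  fin_cases hslot <;> simp only [pvN, PySem.List.count_eq]
  case «2» =>
    -- the '?' slot: the running sum is countP of "unknown"
    have hswap : ∀ (acc : Int) (a : Int),
        (if ([1, 6, 7, 8, 9, 16, 17] : List Int).contains a then acc else acc + 1)
          = (if !(([1, 6, 7, 8, 9, 16, 17] : List Int).contains a) then acc + 1 else acc) := by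
      intro acc a
      cases h : ([1, 6, 7, 8, 9, 16, 17] : List Int).contains a <;> simp
    simp only [hswap]
    rw [PySem.List.foldl_if_add_one, zero_add]
    congr 1
    rw [List.count_eq_countP, List.countP_map]
    exact (List.countP_congr (fun a _ => by simp only [Function.comp_apply]; rw [hq a])).symm
  case «0» =>
    exact (congrArg (fun n : Nat => (n : Int))
      (pv_count_slot ans ['C'] 6 (fun a => pv_beq_of_ne a ['C'] 6 (by decide)
        (fun b hb => by rw [pv_f_eq] at hb; split_ifs at hb <;> simp_all)))).symm
  case «1» =>
    exact (congrArg (fun n : Nat => (n : Int))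
      (pv_count_slot ans ['H'] 1 (fun a => pv_beq_of_ne a ['H'] 1 (by decide)
        (fun b hb => by rw [pv_f_eq] at hb; split_ifs at hb <;> simp_all)))).symm
  case «3» =>
    exact (congrArg (fun n : Nat => (n : Int))
      (pv_count_slot ans ['C','l'] 17 (fun a => pv_beq_of_ne a ['C','l'] 17 (by decide)
        (fun b hb => by rw [pv_f_eq] at hb; split_ifs at hb <;> simp_all)))).symm
  case «4» =>
    exact (congrArg (fun n : Nat => (n : Int))
      (pv_count_slot ans ['F'] 9 (fun a => pv_beq_of_ne a ['F'] 9 (by decide)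
        (fun b hb => by rw [pv_f_eq] at hb; split_ifs at hb <;> simp_all)))).symm
  case «5» =>
    exact (congrArg (fun n : Nat => (n : Int))
      (pv_count_slot ans ['N'] 7 (fun a => pv_beq_of_ne a ['N'] 7 (by decide)
        (fun b hb => by rw [pv_f_eq] at hb; split_ifs at hb <;> simp_all)))).symm
  case «6» =>
    exact (congrArg (fun n : Nat => (n : Int))
      (pv_count_slot ans ['O'] 8 (fun a => pv_beq_of_ne a ['O'] 8 (by decide)
        (fun b hb => by rw [pv_f_eq] at hb; split_ifs at hb <;> simp_all)))).symm
  case «7» =>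
    exact (congrArg (fun n : Nat => (n : Int))
      (pv_count_slot ans ['S'] 16 (fun a => pv_beq_of_ne a ['S'] 16 (by decide)
        (fun b hb => by rw [pv_f_eq] at hb; split_ifs at hb <;> simp_all)))).symm

lemma pv_entry_count (c : Nat) (hc : c ≠ 0) (s : List Char) :
    (if (c : Int) == 1 then s else s ++ (PySem.Int.toStr (c : Int)).toList)
      = (if (c : Int) > 1 then s ++ (PySem.Int.toStr (c : Int)).toList else s) := by
  by_cases h1 : c = 1
  · subst h1; simp
  · have hgt : (c : Int) > 1 := by omega
    have hne : ¬((c : Int) = 1) := by omega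
    simp [hne, hgt]

-- ===== VERDICT (by name: the statement is the Claim_ definition above) =====
theorem smiles_to_formula_spec : Claim_equal_smiles_to_formula := by
  intro smiles ans _
  show smiles_to_formula smiles ans = smiles_to_formula_alt smiles ans
  have hsub : ∀ s ∈ (PySem.Dict.counter (ans.map (fun z => pvELEMENT_SYMBOLS.getD z ['?']))).keys,
      s ∈ pvSymAll := by
    intro s hs
    rw [PySem.Dict.keys_counter] at hs
    rcases List.mem_map.mp ((PySem.Set.mem_ofList _ _).mp hs) with ⟨a, _, rfl⟩
    exact pv_f_mem a
  have hA : smiles_to_formula smiles ans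
      = String.mk ((pvSymAll.filter (fun s =>
          decide (s ∈ (PySem.Dict.counter (ans.map (fun z => pvELEMENT_SYMBOLS.getD z ['?']))).keys))).foldl
        (fun f s => f ++ pvEntry (PySem.Dict.counter (ans.map (fun z => pvELEMENT_SYMBOLS.getD z ['?']))) s) []) :=
    congrArg String.mk (pv_coreA _ (PySem.Dict.nodup_keys_counter _) hsub)
  have hB : smiles_to_formula_alt smiles ans
      = String.mk ((pvSlots.foldl
          (fun parts slot => if pvN ans slot ≠ 0 then parts ++ [pvG ans slot] else parts) []).flatten) := rfl
  rw [hA, hB]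
  apply congrArg String.mk
  rw [PySem.List.foldl_append_eq_flatMap, List.nil_append]
  rw [PySem.List.foldl_append_ite (p := fun slot => pvN ans slot ≠ 0) (f := pvG ans) pvSlots [],
    List.nil_append]
  have hsym : pvSymAll = pvSlots.map Prod.fst := by decide
  rw [hsym, List.filter_map, List.flatMap_map]
  rw [← List.flatMap_def]
  have hfilter : pvSlots.filter
        ((fun s => decide (s ∈ (PySem.Dict.counter (ans.map (fun z => pvELEMENT_SYMBOLS.getD z ['?']))).keys)) ∘ Prod.fst)
      = pvSlots.filter (fun slot => decide (pvN ans slot ≠ 0)) := by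
    apply List.filter_congr
    intro slot hslot
    rw [pv_n_eq ans slot hslot]
    simp only [Function.comp, decide_eq_decide, PySem.Dict.keys_counter, PySem.Set.mem_ofList]
    rw [← List.count_pos_iff]
    omega
  rw [hfilter]
  rw [List.flatMap_def, List.flatMap_def]
  apply congrArg List.flatten
  apply List.map_congr_left
  intro slot hslot
  have h2 := List.mem_filter.mp hslot
  have hcnt := pv_n_eq ans slot h2.1
  have hne : List.count slot.1 (ans.map (fun x => pvELEMENT_SYMBOLS.getD x ['?'])) ≠ 0 := by
    have := of_decide_eq_true h2.2
    rw [hcnt] at this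
    omega
  show pvEntry _ slot.1 = pvG ans slot
  unfold pvEntry pvG
  rw [PySem.Dict.getD_counter, hcnt, pv_entry_count _ hne]
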